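-- pv_equiv track=rewrite | github.com/www-gang-tech/platform | cli/gang/core/images.py | generate_picture_element
-- ===== SOURCE A (Python) =====
-- from typing import Dict, List, Any, Tuple
--
-- def generate_picture_element(image_src: str, alt_text: str, variants: List[Dict[str, Any]]) -> str:
--     """Generate HTML <picture> element with responsive images"""
--     if not variants:
--         return f'<img src="{image_src}" alt="{alt_text}" loading="lazy">'
--
--     # Group by format
--     by_format = {}
--     for variant in variants:
--         fmt = variant['format']
--         if fmt not in by_format:
--             by_format[fmt] = []
--         by_format[fmt].append(variant)
--
--     # Build <picture> element
--     html = ['<picture>']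
--
--     # Add source elements for each format (AVIF first, then WebP)
--     for fmt in ['avif', 'webp']:
--         if fmt in by_format:
--             sources = by_format[fmt]
--             srcset = ', '.join([f"/assets/images/{v['path']} {v['width']}w" for v in sources])
--             html.append(f'  <source type="image/{fmt}" srcset="{srcset}">')
--
--     # Fallback img
--     fallback_variant = variants[-1] if variants else None
--     if fallback_variant:
--         fallback_src = f"/assets/images/{fallback_variant['path']}"
--     else:
--         fallback_src = image_src
--
--     html.append(f'  <img src="{fallback_src}" alt="{alt_text}" loading="lazy" decoding="async">')
--     html.append('</picture>')
--
--     return '\n'.join(html)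
-- ===== SOURCE B (Python) =====
-- from typing import Dict, List, Any
--
--
-- def _source_lines(fmt: str, variants: List[Dict[str, Any]]) -> List[str]:
--     """Return the <source> line for one format, or [] if no variant has it."""
--     sources = [v for v in variants if v['format'] == fmt]
--     if not sources:
--         return []
--     srcset = ', '.join(f"/assets/images/{v['path']} {v['width']}w" for v in sources)
--     return [f'  <source type="image/{fmt}" srcset="{srcset}">']
--
--
-- def generate_picture_element(image_src: str, alt_text: str, variants: List[Dict[str, Any]]) -> str:
--     """Generate HTML <picture> element with responsive images"""
--     if not variants:
--         return f'<img src="{image_src}" alt="{alt_text}" loading="lazy">'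
--     img = f'  <img src="/assets/images/{variants[-1]["path"]}" alt="{alt_text}" loading="lazy" decoding="async">'
--     return '\n'.join(['<picture>']
--                      + _source_lines('avif', variants)
--                      + _source_lines('webp', variants)
--                      + [img, '</picture>'])
-- ===== Notes on version B (the rewrite author's own statement) =====
-- stated objective: simpler
-- what changed: Drops the by_format grouping dictionary and the html accumulator loop: each format's <source> line is produced by one helper that filters the variants directly, and the result is a single join of concatenated list literals.
import Mathlib
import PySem

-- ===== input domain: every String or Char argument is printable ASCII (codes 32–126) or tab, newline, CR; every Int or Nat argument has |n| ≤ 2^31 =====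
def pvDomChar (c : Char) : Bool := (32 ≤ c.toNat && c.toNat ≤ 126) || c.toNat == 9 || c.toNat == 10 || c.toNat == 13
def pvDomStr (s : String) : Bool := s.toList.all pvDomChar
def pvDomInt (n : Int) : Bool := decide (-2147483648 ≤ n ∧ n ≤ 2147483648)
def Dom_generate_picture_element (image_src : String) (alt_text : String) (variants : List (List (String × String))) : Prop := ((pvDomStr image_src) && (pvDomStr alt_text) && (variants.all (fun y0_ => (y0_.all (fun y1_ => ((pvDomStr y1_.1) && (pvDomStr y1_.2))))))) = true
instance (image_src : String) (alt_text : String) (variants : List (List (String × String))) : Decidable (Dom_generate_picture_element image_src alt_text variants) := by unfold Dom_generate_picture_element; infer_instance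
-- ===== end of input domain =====

-- B drops A's by_format grouping dictionary and html accumulator loop: a helper filters the
-- variants per format and the result is one join of concatenated list literals (objective: simpler).


-- ===== PORT A =====
-- v[k]: first-match association-list lookup; exact for Python's dict because Pre_ requires each
-- variant's keys to be distinct and the looked-up keys present (KeyError is excluded by Pre_).
def pvGetS (v : List (String × String)) (k : String) : String := (List.lookup k v).getD ""

-- the body of A's grouping loop: `if fmt not in by_format: by_format[fmt] = []` + `by_format[fmt].append(variant)`
def pvStepA (d : PySem.Dict String (List (List (String × String)))) (v : List (String × String)) :
    PySem.Dict String (List (List (String × String))) :=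
  let fmt := pvGetS v "format"
  let d' := if d.contains fmt then d else d.insert fmt []
  d'.insert fmt (d'.getD fmt [] ++ [v])

def generate_picture_element (image_src : String) (alt_text : String) (variants : List (List (String × String))) : String :=
  if variants = [] then
    "<img src=\"" ++ image_src ++ "\" alt=\"" ++ alt_text ++ "\" loading=\"lazy\">"
  else
    let by_format := variants.foldl pvStepA PySem.Dict.empty
    let html := ["<picture>"]
    let html := ["avif", "webp"].foldl (fun html fmt =>
      if by_format.contains fmt then
        let sources := by_format.getD fmt []
        let srcset := PySem.Str.join ", " (sources.map (fun v =>
          "/assets/images/" ++ pvGetS v "path" ++ " " ++ pvGetS v "width" ++ "w"))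
        html ++ ["  <source type=\"image/" ++ fmt ++ "\" srcset=\"" ++ srcset ++ "\">"]
      else html) html
    let fallback_src := match PySem.List.pyGet? variants (-1) with
      | some fv => "/assets/images/" ++ pvGetS fv "path"
      | none => image_src
    let html := html ++ ["  <img src=\"" ++ fallback_src ++ "\" alt=\"" ++ alt_text ++ "\" loading=\"lazy\" decoding=\"async\">"]
    let html := html ++ ["</picture>"]
    PySem.Str.join "\n" html

-- ===== PORT B =====
def pvSourceLines (fmt : String) (variants : List (List (String × String))) : List String :=
  let sources := variants.filter (fun v => pvGetS v "format" == fmt)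
  if sources = [] then []
  else ["  <source type=\"image/" ++ fmt ++ "\" srcset=\"" ++
        PySem.Str.join ", " (sources.map (fun v =>
          "/assets/images/" ++ pvGetS v "path" ++ " " ++ pvGetS v "width" ++ "w")) ++ "\">"]

def generate_picture_element_alt (image_src : String) (alt_text : String) (variants : List (List (String × String))) : String :=
  if variants = [] then
    "<img src=\"" ++ image_src ++ "\" alt=\"" ++ alt_text ++ "\" loading=\"lazy\">"
  else
    let img := "  <img src=\"/assets/images/" ++
      pvGetS ((PySem.List.pyGet? variants (-1)).getD []) "path" ++
      "\" alt=\"" ++ alt_text ++ "\" loading=\"lazy\" decoding=\"async\">"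
    PySem.Str.join "\n" (["<picture>"]
      ++ pvSourceLines "avif" variants
      ++ pvSourceLines "webp" variants
      ++ [img, "</picture>"])

-- ===== PRECONDITION & SPEC =====
-- Pre_ excludes exactly the inputs where Python A raises KeyError (a variant missing 'format';
-- an avif/webp variant missing 'path' or 'width'; the last variant missing 'path'), plus
-- association lists repeating a key inside a variant, which represent no Python dict at all
-- (dict construction collapses duplicates before A ever runs).
def Pre_generate_picture_element (image_src : String) (alt_text : String) (variants : List (List (String × String))) : Prop :=
  (∀ v ∈ variants,
      (v.map Prod.fst).Nodup ∧ "format" ∈ v.map Prod.fst ∧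
      ((pvGetS v "format" = "avif" ∨ pvGetS v "format" = "webp") →
        "path" ∈ v.map Prod.fst ∧ "width" ∈ v.map Prod.fst)) ∧
  (variants = [] ∨ "path" ∈ ((variants.getLast?).getD []).map Prod.fst)
instance (image_src : String) (alt_text : String) (variants : List (List (String × String))) : Decidable (Pre_generate_picture_element image_src alt_text variants) := by unfold Pre_generate_picture_element; infer_instance

def pvWitness_generate_picture_element : String × String × (List (List (String × String))) :=
  ("img.png", "an image", [[("format", "avif"), ("path", "a.avif"), ("width", "100")]])

def Spec_generate_picture_element (image_src : String) (alt_text : String) (variants : List (List (String × String))) (out : String) : Prop := out = generate_picture_element_alt image_src alt_text variants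
instance (image_src : String) (alt_text : String) (variants : List (List (String × String))) (out : String) : Decidable (Spec_generate_picture_element image_src alt_text variants out) := by unfold Spec_generate_picture_element; infer_instance

-- ===== CLAIM (what is proved, stated in full; the proofs are below) =====
def Claim_equal_generate_picture_element : Prop := ∀ (image_src : String) (alt_text : String) (variants : List (List (String × String))), Dom_generate_picture_element image_src alt_text variants → Pre_generate_picture_element image_src alt_text variants → Spec_generate_picture_element image_src alt_text variants (generate_picture_element image_src alt_text variants)

-- ===== LEMMAS AND PROOFS =====

-- one grouping step seen through getD
theorem pvStepA_getD (d : PySem.Dict String (List (List (String × String))))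
    (v : List (String × String)) (fmt : String) :
    (pvStepA d v).getD fmt [] =
      d.getD fmt [] ++ (if pvGetS v "format" == fmt then [v] else []) := by
  unfold pvStepA
  by_cases hc : d.contains (pvGetS v "format")
  · simp only [hc, if_true, PySem.Dict.getD_insert]
    by_cases h : fmt = pvGetS v "format"
    · simp [h]
    · simp [h, Ne.symm h]
  · have hcf : d.contains (pvGetS v "format") = false := by simpa using hc
    simp only [hcf, Bool.false_eq_true, if_false, PySem.Dict.getD_insert]
    by_cases h : fmt = pvGetS v "format"
    · subst h
      rw [PySem.Dict.getD_of_not_contains d [] hcf]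
      simp
    · simp [h, Ne.symm h]

-- one grouping step seen through contains
theorem pvStepA_contains (d : PySem.Dict String (List (List (String × String))))
    (v : List (String × String)) (fmt : String) :
    (pvStepA d v).contains fmt = ((pvGetS v "format" == fmt) || d.contains fmt) := by
  unfold pvStepA
  by_cases hc : d.contains (pvGetS v "format")
  · simp only [hc, if_true, PySem.Dict.contains_insert]
    cases h : pvGetS v "format" == fmt <;> cases hf : fmt == pvGetS v "format" <;> simp_all
  · simp only [hc, Bool.false_eq_true, if_false, PySem.Dict.contains_insert]
    cases h : pvGetS v "format" == fmt <;> cases hf : fmt == pvGetS v "format" <;> simp_all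

-- the grouping loop yields exactly the format-filtered sublist
theorem foldA_getD (vs : List (List (String × String)))
    (d : PySem.Dict String (List (List (String × String)))) (fmt : String) :
    (vs.foldl pvStepA d).getD fmt [] =
      d.getD fmt [] ++ vs.filter (fun v => pvGetS v "format" == fmt) := by
  induction vs generalizing d with
  | nil => simp
  | cons v vs ih =>
    simp only [List.foldl_cons, ih, pvStepA_getD, List.filter_cons]
    by_cases h : pvGetS v "format" == fmt <;> simp [h]

-- the grouping loop has a key iff some variant has that format
theorem foldA_contains (vs : List (List (String × String)))
    (d : PySem.Dict String (List (List (String × String)))) (fmt : String) :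
    (vs.foldl pvStepA d).contains fmt =
      (d.contains fmt || !(vs.filter (fun v => pvGetS v "format" == fmt)).isEmpty) := by
  induction vs generalizing d with
  | nil => simp
  | cons v vs ih =>
    simp only [List.foldl_cons, ih, pvStepA_contains, List.filter_cons]
    cases h : pvGetS v "format" == fmt <;> cases hd : d.contains fmt <;> simp_all

-- A's per-format branch equals B's pvSourceLines, appended
theorem branch_eq (variants : List (List (String × String))) (html : List String) (fmt : String) :
    (if (variants.foldl pvStepA PySem.Dict.empty).contains fmt then
        html ++ ["  <source type=\"image/" ++ fmt ++ "\" srcset=\"" ++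
          PySem.Str.join ", " (((variants.foldl pvStepA PySem.Dict.empty).getD fmt []).map (fun v =>
            "/assets/images/" ++ pvGetS v "path" ++ " " ++ pvGetS v "width" ++ "w")) ++ "\">"]
      else html) = html ++ pvSourceLines fmt variants := by
  rw [foldA_contains, foldA_getD]
  unfold pvSourceLines
  by_cases h : variants.filter (fun v => pvGetS v "format" == fmt) = [] <;>
    simp [h]

-- the two f-string shapes of the fallback <img> line coincide
theorem img_line_eq (p : String) :
    "  <img src=\"" ++ ("/assets/images/" ++ p) = "  <img src=\"/assets/images/" ++ p := by
  rw [← String.append_assoc]; rfl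

-- ===== VERDICT (by name: the statement is the Claim_ definition above) =====
theorem generate_picture_element_spec : Claim_equal_generate_picture_element := by
  intro image_src alt_text variants _ _
  unfold Spec_generate_picture_element generate_picture_element generate_picture_element_alt
  by_cases hv : variants = []
  · simp [hv]
  · simp only [if_neg hv, List.foldl_cons, List.foldl_nil]
    rw [branch_eq, branch_eq]
    obtain ⟨fv, hfv⟩ : ∃ fv, variants.getLast? = some fv := by
      cases h : variants.getLast? with
      | none => exact absurd (List.getLast?_eq_none_iff.mp h) hv
      | some fv => exact ⟨fv, rfl⟩
    rw [PySem.List.pyGet?_neg_one, hfv]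
    simp [List.append_assoc, img_line_eq]
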